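-- pv_equiv track=rewrite | github.com/cde-ev/DokuForge2 | dokuforge/parser.py | splitleftbracket
-- ===== SOURCE A (Python) =====
-- def splitleftbracket(line):
--     openings = set([u'(', u'[', u'{'])
--     bracket, rest = '', ''
--     stillbracket = True
--     for i in range(len(line)):
--         c = line[i]
--         if c not in openings:
--             stillbracket = False
--         if stillbracket:
--             bracket = bracket + c
--         else:
--             rest = rest + c
--     return [bracket, rest]
-- ===== SOURCE B (Python) =====
-- def splitleftbracket(line):
--     i = 0
--     n = len(line)
--     while i < n and line[i] in '([{':
--         i += 1
--     return [line[:i], line[i:]]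
-- ===== Notes on version B (the rewrite author's own statement) =====
-- stated objective: simpler
-- what changed: Replaces the flag-driven full scan with two per-character string accumulators by one early-stopping index scan over the bracket prefix followed by two slices.
import Mathlib
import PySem

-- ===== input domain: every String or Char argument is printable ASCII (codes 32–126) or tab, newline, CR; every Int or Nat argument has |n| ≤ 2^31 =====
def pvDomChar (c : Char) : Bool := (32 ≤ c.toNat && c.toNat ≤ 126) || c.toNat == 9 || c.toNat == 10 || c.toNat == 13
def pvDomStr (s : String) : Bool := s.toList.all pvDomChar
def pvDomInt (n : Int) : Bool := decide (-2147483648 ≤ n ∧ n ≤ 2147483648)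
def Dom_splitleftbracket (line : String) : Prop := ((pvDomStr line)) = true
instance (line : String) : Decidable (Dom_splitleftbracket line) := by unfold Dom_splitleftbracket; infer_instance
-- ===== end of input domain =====

-- B replaces A's flag-driven full scan with two string accumulators by one
-- early-stopping index scan plus two slices (objective: simpler).

-- ===== PORT A =====
-- A's for-loop over the characters of line: state (bracket, rest, stillbracket)
def splitleftbracketGo (cs : List Char) (bracket rest : String) (still : Bool) : List String :=
  match cs with
  | [] => [bracket, rest]
  | c :: cs =>
      let still' := if c ∈ ['(', '[', '{'] then still else false
      if still' then splitleftbracketGo cs (bracket.push c) rest still'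
      else splitleftbracketGo cs bracket (rest.push c) still'

def splitleftbracket (line : String) : List String :=
  splitleftbracketGo line.toList "" "" true

-- ===== PORT B =====
-- B's while loop: length of the opening-bracket prefix (stops at first non-bracket)
def sbCount (cs : List Char) : Nat :=
  match cs with
  | [] => 0
  | c :: cs => if c = '(' ∨ c = '[' ∨ c = '{' then sbCount cs + 1 else 0

-- line[:i] and line[i:] with 0 ≤ i ≤ len(line) are exactly take/drop
def splitleftbracket_alt (line : String) : List String :=
  let i := sbCount line.toList
  [String.ofList (line.toList.take i), String.ofList (line.toList.drop i)]

-- ===== PRECONDITION & SPEC =====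
def Spec_splitleftbracket (line : String) (out : List String) : Prop := out = splitleftbracket_alt line
instance (line : String) (out : List String) : Decidable (Spec_splitleftbracket line out) := by unfold Spec_splitleftbracket; infer_instance

-- ===== CLAIM (what is proved, stated in full; the proofs are below) =====
def Claim_equal_splitleftbracket : Prop := ∀ (line : String), Dom_splitleftbracket line → Spec_splitleftbracket line (splitleftbracket line)

-- ===== LEMMAS AND PROOFS =====

theorem sb_go_false (cs : List Char) (b r : String) :
    splitleftbracketGo cs b r false = [b, r ++ String.ofList cs] := by
  induction cs generalizing r with
  | nil => simp [splitleftbracketGo, String.ofList_nil]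
  | cons c cs ih =>
      simp only [splitleftbracketGo, ite_self, Bool.false_eq_true, if_false]
      rw [ih, String.push_eq_append]
      simp [← String.toList_inj]

theorem sb_go_true (cs : List Char) (b r : String) :
    splitleftbracketGo cs b r true =
      [b ++ String.ofList (cs.take (sbCount cs)), r ++ String.ofList (cs.drop (sbCount cs))] := by
  induction cs generalizing b with
  | nil => simp [splitleftbracketGo, sbCount, String.ofList_nil]
  | cons c cs ih =>
      by_cases h : c = '(' ∨ c = '[' ∨ c = '{'
      · have hm : c ∈ ['(', '[', '{'] := by simpa using h
        simp only [splitleftbracketGo, if_pos hm, if_true]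
        rw [ih, String.push_eq_append]
        simp only [sbCount, if_pos h, List.take_succ_cons, List.drop_succ_cons]
        simp [← String.toList_inj]
      · have hm : c ∉ ['(', '[', '{'] := by simpa using h
        simp only [splitleftbracketGo, if_neg hm, Bool.false_eq_true, if_false]
        rw [sb_go_false, String.push_eq_append]
        simp only [sbCount, if_neg h, List.take_zero, List.drop_zero]
        simp [← String.toList_inj]

-- ===== VERDICT (by name: the statement is the Claim_ definition above) =====
theorem splitleftbracket_spec : Claim_equal_splitleftbracket := by
  intro line _
  unfold Spec_splitleftbracket splitleftbracket splitleftbracket_alt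
  rw [sb_go_true]
  simp
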